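-- pv_equiv track=rewrite | github.com/siddhesh1991/dsa_questions | InterviewQuery.py | closest_key
-- ===== SOURCE A (Python) =====
-- def closest_key(dictionary, input):
--     dict_pos ={}
--     for k,v in dictionary.items():
--         pos = v.index(input)
--         dict_pos[k] = pos
--
--     min_val = min(dict_pos.values())
--     min_key = [k for k,v in dict_pos.items() if v == min_val]
--     return min_key[0]
-- ===== SOURCE B (Python) =====
-- def closest_key(dictionary, input):
--     best_key = None
--     best_pos = None
--     for k, v in dictionary.items():
--         pos = v.index(input)
--         if best_pos is None or pos < best_pos:
--             best_key, best_pos = k, pos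
--     return best_key
-- ===== Notes on version B (the rewrite author's own statement) =====
-- stated objective: simpler
-- what changed: A builds an intermediate position dict, then takes min over its values in a second pass and collects all argmin keys in a third; B is one loop over items() keeping the running best (strict < keeps the first key on ties). Pre_ excludes the empty dictionary (A's min([]) raises ValueError while B's loop never runs and it returns None) and inputs missing from some value list (both raise ValueError).
-- outside the precondition, e.g. on closest_key({}, 5): A raises ValueError, B returns None
import Mathlib
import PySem

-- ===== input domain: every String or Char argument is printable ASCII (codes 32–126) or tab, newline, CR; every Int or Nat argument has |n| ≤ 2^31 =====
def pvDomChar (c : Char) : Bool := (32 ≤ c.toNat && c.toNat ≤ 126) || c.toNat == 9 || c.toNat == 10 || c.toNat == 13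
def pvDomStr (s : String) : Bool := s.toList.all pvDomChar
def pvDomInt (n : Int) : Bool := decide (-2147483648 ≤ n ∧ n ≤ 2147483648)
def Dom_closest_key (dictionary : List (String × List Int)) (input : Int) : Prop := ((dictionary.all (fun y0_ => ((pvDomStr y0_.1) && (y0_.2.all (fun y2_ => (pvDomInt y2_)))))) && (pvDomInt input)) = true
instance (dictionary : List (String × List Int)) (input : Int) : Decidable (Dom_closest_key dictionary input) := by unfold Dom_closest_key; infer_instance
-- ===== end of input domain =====

-- B replaces A's dict-of-positions + min + argmin-comprehension with a single running-best loop (simpler, one pass).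

-- ===== PORT A =====
def closest_key (dictionary : List (String × List Int)) (input : Int) : String :=
  -- dict_pos = {}; for k,v in dictionary.items(): dict_pos[k] = v.index(input)
  let dict_pos : PySem.Dict String Nat :=
    dictionary.foldl (fun d p => d.insert p.1 ((PySem.List.index? p.2 input).getD 0)) PySem.Dict.empty
  -- min_val = min(dict_pos.values())   (Pre_ guarantees nonempty; the default is unreachable)
  let min_val : Nat := (PySem.List.min? dict_pos.values (fun v => v)).getD 0
  -- min_key = [k for k,v in dict_pos.items() if v == min_val]
  let min_key : List String := (dict_pos.items.filter (fun p => p.2 == min_val)).map (·.1)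
  -- return min_key[0]   (Pre_ guarantees nonempty; the default is unreachable)
  (PySem.List.pyGet? min_key 0).getD ""

-- ===== PORT B =====
def closest_key_alt (dictionary : List (String × List Int)) (input : Int) : String :=
  let best : Option (String × Nat) :=
    dictionary.foldl (fun best p =>
      let pos : Nat := (PySem.List.index? p.2 input).getD 0
      match best with
      | none => some (p.1, pos)
      | some b => if pos < b.2 then some (p.1, pos) else some b) none
  match best with
  | some b => b.1
  | none => ""  -- Source B returns None (no String) here; this input is outside Pre_

-- ===== PRECONDITION & SPEC =====
-- Pre_ excludes the empty dictionary (A raises ValueError via min([]); B returns None, not a string),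
-- value lists not containing input (both raise ValueError), and association lists with duplicate keys,
-- which a Python dict cannot contain (the list encoding is ambiguous there).
def Pre_closest_key (dictionary : List (String × List Int)) (input : Int) : Prop :=
  dictionary ≠ [] ∧ (dictionary.map (·.1)).Nodup ∧ ∀ p ∈ dictionary, input ∈ p.2
instance (dictionary : List (String × List Int)) (input : Int) : Decidable (Pre_closest_key dictionary input) := by unfold Pre_closest_key; infer_instance
def pvWitness_closest_key : (List (String × List Int)) × Int := ([("a", [3, 5]), ("b", [5, 3])], 5)

def Spec_closest_key (dictionary : List (String × List Int)) (input : Int) (out : String) : Prop := out = closest_key_alt dictionary input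
instance (dictionary : List (String × List Int)) (input : Int) (out : String) : Decidable (Spec_closest_key dictionary input out) := by unfold Spec_closest_key; infer_instance

-- ===== CLAIM (what is proved, stated in full; the proofs are below) =====
def Claim_equal_closest_key : Prop := ∀ (dictionary : List (String × List Int)) (input : Int), Dom_closest_key dictionary input → Pre_closest_key dictionary input → Spec_closest_key dictionary input (closest_key dictionary input)

-- ===== LEMMAS AND PROOFS =====

-- running best: first pair with minimal second component
def pickFold (b : String × Nat) (q : List (String × Nat)) : String × Nat :=
  q.foldl (fun a x => if x.2 < a.2 then x else a) b

theorem pickFold_nil (b : String × Nat) : pickFold b [] = b := rfl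

theorem pickFold_cons (b x : String × Nat) (q : List (String × Nat)) :
    pickFold b (x :: q) = pickFold (if x.2 < b.2 then x else b) q := rfl

theorem pickFold_snd (q : List (String × Nat)) : ∀ b : String × Nat,
    (pickFold b q).2 = (q.map (·.2)).foldl min b.2 := by
  induction q with
  | nil => intro b; rfl
  | cons x q ih =>
    intro b
    rw [pickFold_cons, List.map_cons, List.foldl_cons, ih]
    congr 1
    split_ifs with h <;> omega

theorem pickFold_snd_le (q : List (String × Nat)) : ∀ b : String × Nat,
    (pickFold b q).2 ≤ b.2 := by
  induction q with
  | nil => intro b; simp [pickFold_nil]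
  | cons x q ih =>
    intro b
    rw [pickFold_cons]
    split_ifs with h
    · exact le_trans (ih x) (by omega)
    · exact ih b

theorem pickFold_eq_of_snd_eq (q : List (String × Nat)) : ∀ b : String × Nat,
    (pickFold b q).2 = b.2 → pickFold b q = b := by
  induction q with
  | nil => intro b _; rfl
  | cons x q ih =>
    intro b h
    rw [pickFold_cons] at h ⊢
    split_ifs at h ⊢ with hx
    · have := pickFold_snd_le q x; omega
    · exact ih b h

theorem filter_head_pickFold (q : List (String × Nat)) : ∀ b : String × Nat,
    (((b :: q).filter (fun p => p.2 == (pickFold b q).2)).map (·.1)).head? =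
      some (pickFold b q).1 := by
  induction q with
  | nil => intro b; simp [pickFold_nil]
  | cons x q ih =>
    intro b
    rw [pickFold_cons]
    by_cases hx : x.2 < b.2
    · have hm : (pickFold x q).2 < b.2 := lt_of_le_of_lt (pickFold_snd_le q x) hx
      rw [if_pos hx]
      have hb : (b.2 == (pickFold x q).2) = false :=
        beq_eq_false_iff_ne.mpr (Nat.ne_of_gt hm)
      rw [List.filter_cons, hb]
      simpa using ih x
    · rw [if_neg hx]
      by_cases hm : (pickFold b q).2 = b.2
      · have hpb : pickFold b q = b := pickFold_eq_of_snd_eq q b hm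
        rw [hpb]
        simp [List.filter_cons]
      · have hlt : (pickFold b q).2 < b.2 :=
          lt_of_le_of_ne (pickFold_snd_le q b) hm
        have hxge : (pickFold b q).2 < x.2 := by omega
        have hb : (b.2 == (pickFold b q).2) = false :=
          beq_eq_false_iff_ne.mpr (Nat.ne_of_gt hlt)
        have hxf : (x.2 == (pickFold b q).2) = false :=
          beq_eq_false_iff_ne.mpr (Nat.ne_of_gt hxge)
        rw [List.filter_cons, hb, List.filter_cons, hxf]
        have := ih b
        rwa [List.filter_cons, hb] at this

theorem foldl_step_some {α : Type} (g : α → String × Nat) (l : List α) : ∀ b : String × Nat,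
    l.foldl (fun best p =>
      match best with
      | none => some (g p)
      | some b => if (g p).2 < b.2 then some (g p) else some b) (some b)
    = some (pickFold b (l.map g)) := by
  induction l with
  | nil => intro b; rfl
  | cons x l ih =>
    intro b
    rw [List.foldl_cons, List.map_cons, pickFold_cons]
    simp only
    split_ifs with h <;> exact ih _

-- ===== VERDICT (by name: the statement is the Claim_ definition above) =====
theorem closest_key_spec : Claim_equal_closest_key := by
  intro dictionary input _hdom hpre
  obtain ⟨hne, hnd, _hmem⟩ := hpre
  unfold Spec_closest_key closest_key closest_key_alt
  obtain ⟨d0, rest, rfl⟩ : ∃ d0 rest, dictionary = d0 :: rest := by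
    cases dictionary with
    | nil => exact absurd rfl hne
    | cons d0 rest => exact ⟨d0, rest, rfl⟩
  set f : (String × List Int) → String × Nat :=
    fun p => (p.1, (PySem.List.index? p.2 input).getD 0) with hf
  -- A side: the dict's items are the mapped list (fresh distinct keys)
  have hitems :
      ((d0 :: rest).foldl (fun d p => d.insert p.1 ((PySem.List.index? p.2 input).getD 0))
        PySem.Dict.empty).items = f d0 :: rest.map f := by
    have := PySem.Dict.items_foldl_insert_fresh (l := d0 :: rest)
      (k := fun p => p.1) (v := fun p => (PySem.List.index? p.2 input).getD 0)
      (d := PySem.Dict.empty)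
      (by intro a _; exact PySem.Dict.contains_empty _)
      (by simpa using hnd)
    simpa using this
  -- B side: the fold is the running best over the mapped list
  have hBfold :
      (d0 :: rest).foldl (fun best p =>
        match best with
        | none => some (p.1, (PySem.List.index? p.2 input).getD 0)
        | some b => if (PySem.List.index? p.2 input).getD 0 < b.2
            then some (p.1, (PySem.List.index? p.2 input).getD 0) else some b) none
      = some (pickFold (f d0) (rest.map f)) := by
    rw [List.foldl_cons]
    exact foldl_step_some f rest (f d0)
  -- min over the values is the running best's position
  have hmin :
      (PySem.List.min? ((f d0 :: rest.map f).map (fun x => x.2)) (fun v => v)).getD 0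
        = (pickFold (f d0) (rest.map f)).2 := by
    rw [List.map_cons, PySem.List.min?_id_cons, pickFold_snd]
    rfl
  simp only [PySem.Dict.values, hitems, hBfold, hmin]
  -- the head of the argmin comprehension is the running best's key
  have hfilter := filter_head_pickFold (rest.map f) (f d0)
  obtain ⟨s, t, hst⟩ : ∃ s t, (((f d0 :: rest.map f).filter
      (fun p => p.2 == (pickFold (f d0) (rest.map f)).2)).map (·.1)) = s :: t := by
    rcases hfs : (((f d0 :: rest.map f).filter
        (fun p => p.2 == (pickFold (f d0) (rest.map f)).2)).map (·.1)) with _ | ⟨s, t⟩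
    · rw [hfs] at hfilter; simp at hfilter
    · exact ⟨s, t, hfs⟩
  have hs : s = (pickFold (f d0) (rest.map f)).1 := by
    rw [hst] at hfilter; simpa using hfilter
  rw [hst, hs]
  simp [PySem.List.pyGet?, PySem.List.pyIdx?]
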